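-- pv_equiv track=rewrite | github.com/aminravanbakhsh/Design-Algorithm | dp/Bell.py | func
-- ===== SOURCE A (Python) =====
-- def func(n):
--
--     arr = [[0 for i in range(n)] for j in range(n)]
--     for i in range(n):
--         arr[i][0] = 1
--
--     for i in range(0, n-1):
--         for k in range(1,i+2):
--             arr[i+1][k] = (k+1) * arr[i][k] + arr[i][k-1]
--
--     ans = 0
--     for i in range(n):
--         ans += arr[n-1][i]
--
--     return ans
-- ===== SOURCE B (Python) =====
-- def func(n):
--     # Bell-triangle (Aitken array) computation; func(n) = Bell(n) for n >= 1, 0 otherwise.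
--     if n <= 0:
--         return 0
--     row = [1]
--     for _ in range(n - 1):
--         c = row[-1]
--         new = [c]
--         for x in row:
--             c = c + x
--             new.append(c)
--         row = new
--     return row[-1]
-- ===== Notes on version B (the rewrite author's own statement) =====
-- stated objective: faster
-- what changed: Replaces the n-by-n weighted Stirling-number DP table whose last row is summed by the classic Bell/Aitken triangle built row by row with running sums, returning the last entry of the final row; O(n^2) memory drops to one row and no multiplications are needed.
import Mathlib
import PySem

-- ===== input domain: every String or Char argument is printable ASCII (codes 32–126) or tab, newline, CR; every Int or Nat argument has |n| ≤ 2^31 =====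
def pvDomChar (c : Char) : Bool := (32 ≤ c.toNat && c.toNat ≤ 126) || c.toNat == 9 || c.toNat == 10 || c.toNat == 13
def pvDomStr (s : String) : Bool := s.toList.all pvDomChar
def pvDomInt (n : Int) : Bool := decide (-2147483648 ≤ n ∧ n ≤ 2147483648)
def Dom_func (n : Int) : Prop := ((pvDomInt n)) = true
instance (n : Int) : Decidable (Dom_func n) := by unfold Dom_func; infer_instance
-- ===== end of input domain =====

-- B replaces A's n×n weighted (Stirling-row) DP table, whose last row is summed, by the
-- Bell/Aitken triangle built row by row with running sums: O(n) rows kept instead of the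
-- whole table, and no multiplications; both return the same value on every int input.

-- ===== PORT A =====
-- arr = [[0]*n...]; arr[i][0]=1; arr[i+1][k]=(k+1)*arr[i][k]+arr[i][k-1]; sum of last row
def func (n : Int) : Int :=
  let arr : List (List Int) :=
    (PySem.List.pyRange 0 n 1).map (fun _ => (PySem.List.pyRange 0 n 1).map (fun _ => (0 : Int)))
  let arr := (PySem.List.pyRange 0 n 1).foldl
    (fun a i => a.set i.toNat ((PySem.List.pyGetD a i []).set 0 1)) arr
  let arr := (PySem.List.pyRange 0 (n - 1) 1).foldl (fun a i =>
    (PySem.List.pyRange 1 (i + 2) 1).foldl (fun a k =>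
      a.set (i + 1).toNat ((PySem.List.pyGetD a (i + 1) []).set k.toNat
        ((k + 1) * PySem.List.pyGetD (PySem.List.pyGetD a i []) k 0
          + PySem.List.pyGetD (PySem.List.pyGetD a i []) (k - 1) 0))) a) arr
  (PySem.List.pyRange 0 n 1).foldl
    (fun ans i => ans + PySem.List.pyGetD (PySem.List.pyGetD arr (n - 1) []) i 0) 0

-- ===== PORT B =====
-- if n<=0: 0; row=[1]; repeat n-1 times: c=row[-1]; new=[c]; for x in row: c=c+x; new.append(c); return row[-1]
def func_alt (n : Int) : Int :=
  if n ≤ 0 then 0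
  else
    let row : List Int := (PySem.List.pyRange 0 (n - 1) 1).foldl (fun row _ =>
      let c := PySem.List.pyGetD row (-1) 0
      (row.foldl (fun s x => (s.1 + x, s.2 ++ [s.1 + x])) (c, [c])).2) [1]
    PySem.List.pyGetD row (-1) 0

-- ===== PRECONDITION & SPEC =====
def Spec_func (n : Int) (out : Int) : Prop := out = func_alt n
instance (n : Int) (out : Int) : Decidable (Spec_func n out) := by unfold Spec_func; infer_instance

-- ===== CLAIM (what is proved, stated in full; the proofs are below) =====
def Claim_equal_func : Prop := ∀ (n : Int), Dom_func n → Spec_func n (func n)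

-- ===== LEMMAS AND PROOFS =====

-- Stirling numbers of the second kind (Int-valued): A's DP recurrence
def stir : Nat → Nat → Int
  | 0, 0 => 1
  | 0, _ + 1 => 0
  | _ + 1, 0 => 0
  | m + 1, k + 1 => (k + 1) * stir m (k + 1) + stir m k

-- Bell number as the sum of a Stirling row (what A's last-row sum computes)
def bell (m : Nat) : Int := ∑ k ∈ Finset.range (m + 1), stir m k

-- Bell/Aitken triangle (B's recurrence)
def tri : Nat → Nat → Int
  | 0, _ => 1
  | m + 1, 0 => tri m m
  | m + 1, k + 1 => tri (m + 1) k + tri m k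

def stirRow (N i : Nat) : List Int := (List.range N).map (fun p => stir (i+1) (p+1))
def partRow (N i t : Nat) : List Int := (List.range N).map (fun p => if p ≤ t then stir (i+2) (p+1) else 0)
def rowsAt (N m : Nat) : List (List Int) :=
  (List.range N).map (fun j => if j ≤ m then stirRow N j else stirRow N 0)
def rowsMid (N i t : Nat) : List (List Int) :=
  (List.range N).map (fun j => if j = i+1 then partRow N i t else if j ≤ i then stirRow N j else stirRow N 0)

theorem set_map_range {α : Type} (N t : Nat) (f : Nat → α) (v : α) :
    ((List.range N).map f).set t v = (List.range N).map (fun p => if p = t then v else f p) := by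
  apply List.ext_getElem
  · simp
  · intro i h1 h2
    simp only [List.getElem_set, List.getElem_map, List.getElem_range]
    split_ifs with ha hb hc
    · rfl
    · omega
    · omega
    · rfl

theorem getD_map_range' {α : Type} (N k : Nat) (f : Nat → α) (h : k < N) (d : α) :
    ((List.range N).map f).getD k d = f k := by
  simp [List.getD, h]

theorem pyGetD_map_range {α : Type} (N k : Nat) (f : Nat → α) (h : k < N) (d : α) :
    PySem.List.pyGetD ((List.range N).map f) (↑k) d = f k := by
  rw [PySem.List.pyGetD_natCast]
  exact getD_map_range' N k f h d

theorem stir_one (m : Nat) : stir (m+1) 1 = 1 := by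
  induction m with
  | zero => rfl
  | succ m ih => show 1 * stir (m+1) 1 + stir (m+1) 0 = 1; rw [ih]; cases m <;> rfl

theorem stir_eq_zero (m : Nat) : ∀ k, m < k → stir m k = 0 := by
  induction m with
  | zero => intro k hk; match k, hk with | k+1, _ => rfl
  | succ m ih =>
    intro k hk
    match k, hk with
    | k+1, hk => simp [stir, ih (k+1) (by omega), ih k (by omega)]

-- generic "update every row in order" fold
theorem foldl_set_suffix (g : List Int → List Int) :
    ∀ (suf pre : List (List Int)),
      (List.range' pre.length suf.length).foldl
        (fun a t => a.set t (g (a.getD t []))) (pre ++ suf) = pre ++ suf.map g := by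
  intro suf
  induction suf with
  | nil => intro pre; simp
  | cons s t ih =>
    intro pre
    rw [List.length_cons, List.range'_succ, List.foldl_cons]
    have hg : (pre ++ s :: t).getD pre.length [] = s := by simp [List.getD]
    have hs : (pre ++ s :: t).set pre.length (g s) = (pre ++ [g s]) ++ t := by
      rw [List.set_append_right _ _ (le_refl _)]; simp
    rw [hg, hs]
    have h2 := ih (pre ++ [g s])
    simp only [List.length_append, List.length_cons, List.length_nil] at h2 ⊢
    rw [show pre.length + (0+1) = pre.length + 1 from rfl] at h2
    rw [h2]
    simp

theorem rowsMid_getD_dp (N i : Nat) (t : Nat) (hiN : i + 1 < N) :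
    (rowsMid N i t).getD i [] = stirRow N i ∧ (rowsMid N i t).getD (i+1) [] = partRow N i t := by
  constructor
  · rw [rowsMid, getD_map_range' N i _ (by omega)]
    simp [Nat.ne_of_lt (by omega : i < i + 1)]
  · rw [rowsMid, getD_map_range' N (i+1) _ (by omega)]
    simp

theorem rowsMid_step (N i t : Nat) (hiN : i + 1 < N) (ht : t ≤ i) :
    (rowsMid N i t).set (i+1) (((rowsMid N i t).getD (i+1) []).set (t+1)
        (((t : Int) + 2) * ((rowsMid N i t).getD i []).getD (t+1) 0
          + ((rowsMid N i t).getD i []).getD t 0))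
      = rowsMid N i (t+1) := by
  obtain ⟨hri, hri1⟩ := rowsMid_getD_dp N i t hiN
  rw [hri, hri1]
  have hv1 : (stirRow N i).getD (t+1) 0 = stir (i+1) (t+2) := by
    rw [stirRow, getD_map_range' N (t+1) _ (by omega)]
  have hv2 : (stirRow N i).getD t 0 = stir (i+1) (t+1) := by
    rw [stirRow, getD_map_range' N t _ (by omega)]
  rw [hv1, hv2]
  have hval : ((t : Int) + 2) * stir (i+1) (t+2) + stir (i+1) (t+1) = stir (i+2) (t+2) := by
    show _ = (↑(t+1) + 1) * stir (i+1) (t+1+1) + stir (i+1) (t+1)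
    push_cast; ring
  rw [hval]
  have hpart : (partRow N i t).set (t+1) (stir (i+2) (t+2)) = partRow N i (t+1) := by
    rw [partRow, set_map_range, partRow]
    apply List.map_congr_left
    intro p _
    split_ifs with h1 h2 h3 <;> first
      | rfl
      | (obtain rfl : p = t + 1 := h1; rfl)
      | omega
  rw [hpart, rowsMid, set_map_range, rowsMid]
  apply List.map_congr_left
  intro j _
  split_ifs with h1 h2 <;> first | rfl | omega

def bodyNat (i : Nat) (a : List (List Int)) (t : Nat) : List (List Int) :=
  a.set (i+1) ((a.getD (i+1) []).set (t+1)
    (((t : Int) + 2) * ((a.getD i []).getD (t+1) 0) + (a.getD i []).getD t 0))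

theorem inner_loop_nat (N i : Nat) (hiN : i + 1 < N) :
    ∀ tt, tt ≤ i + 1 →
      (List.range tt).foldl (bodyNat i) (rowsMid N i 0) = rowsMid N i tt := by
  intro tt
  induction tt with
  | zero => intro _; rfl
  | succ tt ih =>
    intro h
    rw [List.range_succ, List.foldl_append, ih (by omega), List.foldl_cons, List.foldl_nil]
    exact rowsMid_step N i tt hiN (by omega)

theorem partRow_zero (N i : Nat) : partRow N i 0 = stirRow N 0 := by
  rw [partRow, stirRow]
  apply List.map_congr_left
  intro p _
  match p with
  | 0 => simp [stir_one]
  | q+1 => simp [stir]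

theorem rowsMid_zero (N i : Nat) : rowsMid N i 0 = rowsAt N i := by
  rw [rowsMid, rowsAt]
  apply List.map_congr_left
  intro j _
  rw [partRow_zero]
  split_ifs with h1 h2 h3 <;> first | rfl | omega | (obtain rfl : j = i + 1 := h1; rfl)

theorem rowsMid_last (N i : Nat) : rowsMid N i (i+1) = rowsAt N (i+1) := by
  rw [rowsMid, rowsAt]
  have hpart : partRow N i (i+1) = stirRow N (i+1) := by
    rw [partRow, stirRow]
    apply List.map_congr_left
    intro p _
    split_ifs with h1
    · rfl
    · rw [stir_eq_zero (i+2) (p+1) (by omega)]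
  apply List.map_congr_left
  intro j _
  rw [hpart]
  split_ifs with h1 h2 h3 <;> first | rfl | omega | (obtain rfl : j = i + 1 := h1; rfl)

theorem outer_loop_nat (N : Nat) (hN : 0 < N) :
    ∀ mm, mm ≤ N - 1 →
      (List.range mm).foldl (fun a m => (List.range (m+1)).foldl (bodyNat m) a) (rowsAt N 0)
        = rowsAt N mm := by
  intro mm
  induction mm with
  | zero => intro _; rfl
  | succ mm ih =>
    intro h
    rw [List.range_succ, List.foldl_append, ih (by omega), List.foldl_cons, List.foldl_nil]
    have hmN : mm + 1 < N := by omega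
    rw [← rowsMid_zero N mm, inner_loop_nat N mm hmN (mm+1) (le_refl _), rowsMid_last]

theorem sum_map_range (N : Nat) (f : Nat → Int) :
    ((List.range N).map f).sum = ∑ k ∈ Finset.range N, f k := rfl

theorem stir_zero (N : Nat) (h : 0 < N) : stir N 0 = 0 := by
  match N, h with
  | M+1, _ => rfl

theorem inner_conv (m : Nat) (a : List (List Int)) :
    (PySem.List.pyRange 1 ((m : Int) + 2) 1).foldl (fun a k =>
      a.set ((m : Int) + 1).toNat ((PySem.List.pyGetD a ((m : Int) + 1) []).set k.toNat
        ((k + 1) * PySem.List.pyGetD (PySem.List.pyGetD a (m : Int) []) k 0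
          + PySem.List.pyGetD (PySem.List.pyGetD a (m : Int) []) (k - 1) 0))) a
      = (List.range (m+1)).foldl (bodyNat m) a := by
  rw [PySem.List.pyRange_one]
  rw [show ((m : Int) + 2 - 1).toNat = m + 1 from by omega]
  rw [List.foldl_map]
  apply PySem.List.foldl_congr_mem
  intro acc t _
  rw [show ((m : Int) + 1).toNat = m + 1 from by omega]
  rw [show ((1 : Int) + ↑t).toNat = t + 1 from by omega]
  rw [show ((m : Int) + 1) = ((m + 1 : Nat) : Int) from by push_cast; ring]
  rw [show ((1 : Int) + ↑t - 1) = ((t : Nat) : Int) from by push_cast; ring]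
  rw [show ((1 : Int) + ↑t + 1) = ((t : Int) + 2) from by ring]
  rw [show ((1 : Int) + ↑t) = ((t + 1 : Nat) : Int) from by push_cast; ring]
  simp only [PySem.List.pyGetD_natCast]
  rfl

theorem stage1_gen (g : List Int → List Int) (suf : List (List Int)) :
    (List.range suf.length).foldl (fun a t => a.set t (g (a.getD t []))) suf = suf.map g := by
  have h := foldl_set_suffix g suf []
  simpa [List.range_eq_range'] using h

theorem func_eq_bell (n : Int) (h : 0 < n) : func n = bell n.toNat := by
  unfold func
  rw [show n = ((n.toNat : Nat) : Int) from by omega]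
  set N := n.toNat with hN
  have hNpos : 0 < N := by omega
  rw [Int.toNat_natCast]
  have hN1 : ((N : Int) - 1) = ((N - 1 : Nat) : Int) := by omega
  rw [hN1]
  simp only [PySem.List.pyRange_zero_nat, List.map_map, Function.comp_def, List.map_const',
    List.length_range]
  have e1 : (List.replicate N (0:Int)).set 0 1 = stirRow N 0 := by
    apply List.ext_getElem
    · simp [stirRow]
    · intro i hi1 hi2
      simp only [List.getElem_set, List.getElem_replicate, stirRow, List.getElem_map,
        List.getElem_range]
      match i with
      | 0 => rfl
      | q+1 => simp [stir]
  have e2 : List.replicate N (stirRow N 0) = rowsAt N 0 := by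
    rw [rowsAt]
    rw [List.map_congr_left (f := fun j => if j ≤ 0 then stirRow N j else stirRow N 0)
      (g := fun _ => stirRow N 0) (by
        intro j _
        show (if j ≤ 0 then stirRow N j else stirRow N 0) = stirRow N 0
        split_ifs with hj
        · obtain rfl : j = 0 := by omega
          rfl
        · rfl)]
    rw [List.map_const', List.length_range]
  have h1 : List.foldl (fun (a : List (List Int)) (i : Int) =>
        a.set i.toNat ((PySem.List.pyGetD a i []).set 0 1))
      (List.replicate N (List.replicate N (0:Int)))
      (List.map (fun (k : Nat) => (k : Int)) (List.range N)) = rowsAt N 0 := by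
    rw [List.foldl_map]
    simp only [Int.toNat_natCast, PySem.List.pyGetD_natCast]
    have h2 := stage1_gen (fun r => r.set 0 1) (List.replicate N (List.replicate N 0))
    simp only [List.length_replicate] at h2
    rw [h2, List.map_replicate, e1, e2]
  rw [h1]
  have h3 : List.foldl (fun (a : List (List Int)) (i : Int) =>
        List.foldl (fun a k =>
          a.set (i + 1).toNat ((PySem.List.pyGetD a (i + 1) []).set k.toNat
            ((k + 1) * PySem.List.pyGetD (PySem.List.pyGetD a i []) k 0
              + PySem.List.pyGetD (PySem.List.pyGetD a i []) (k - 1) 0))) a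
          (PySem.List.pyRange 1 (i + 2)))
      (rowsAt N 0) (List.map (fun (k : Nat) => (k : Int)) (List.range (N - 1)))
      = rowsAt N (N - 1) := by
    rw [List.foldl_map]
    simp only [inner_conv]
    exact outer_loop_nat N hNpos (N - 1) (le_refl _)
  rw [h3]
  have h4 : PySem.List.pyGetD (rowsAt N (N-1)) ((N - 1 : Nat) : Int) [] = stirRow N (N-1) := by
    rw [rowsAt, pyGetD_map_range N (N-1) _ (by omega)]
    simp
  rw [h4, List.foldl_map]
  have h5 : List.foldl (fun (x : Int) (y : Nat) =>
        x + PySem.List.pyGetD (stirRow N (N - 1)) (↑y) 0) 0 (List.range N)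
      = List.foldl (fun (x : Int) (y : Nat) => x + stir N (y+1)) 0 (List.range N) :=
    PySem.List.foldl_congr_mem _ _ _ _ (by
      intro acc k hk
      show acc + PySem.List.pyGetD (stirRow N (N-1)) ↑k 0 = acc + stir N (k+1)
      rw [stirRow, pyGetD_map_range N k _ (List.mem_range.mp hk)]
      rw [show N - 1 + 1 = N from by omega])
  rw [h5, PySem.List.foldl_add, zero_add, sum_map_range]
  unfold bell
  rw [Finset.sum_range_succ' (fun k => stir N k) N]
  rw [stir_zero N hNpos, add_zero]

theorem stir_binom (m : Nat) : ∀ k,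
    stir (m + 1) (k + 1) = ∑ j ∈ Finset.range (m + 1), (m.choose j : Int) * stir j k := by
  induction m with
  | zero => intro k; cases k <;> simp [stir]
  | succ m ih =>
    intro k
    have peel : ∑ j ∈ Finset.range (m + 2), ((m+1).choose j : Int) * stir j k
        = (∑ j ∈ Finset.range (m + 1), ((m+1).choose (j+1) : Int) * stir (j+1) k)
          + ((m+1).choose 0 : Int) * stir 0 k := Finset.sum_range_succ' _ _
    have pascal : ∀ j, ((m+1).choose (j+1) : Int) = (m.choose j : Int) + (m.choose (j+1) : Int) := by
      intro j; rw [Nat.choose_succ_succ]; push_cast; ring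
    have split : ∑ j ∈ Finset.range (m + 1), ((m+1).choose (j+1) : Int) * stir (j+1) k
        = (∑ j ∈ Finset.range (m + 1), (m.choose j : Int) * stir (j+1) k)
          + ∑ j ∈ Finset.range (m + 1), (m.choose (j+1) : Int) * stir (j+1) k := by
      rw [← Finset.sum_add_distrib]
      exact Finset.sum_congr rfl (fun j _ => by rw [pascal j]; ring
      )
    have reass : (∑ j ∈ Finset.range (m + 1), (m.choose (j+1) : Int) * stir (j+1) k)
          + ((m+1).choose 0 : Int) * stir 0 k = stir (m+1) (k+1) := by
      have := (Finset.sum_range_succ' (fun j => (m.choose j : Int) * stir j k) (m+1)).symm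
      -- ∑_{range(m+2)} C(m,j) stir j k = ∑_{range(m+1)} C(m,j+1) stir (j+1) k + C(m,0) stir 0 k
      have h2 : ∑ j ∈ Finset.range (m + 2), (m.choose j : Int) * stir j k
          = ∑ j ∈ Finset.range (m + 1), (m.choose j : Int) * stir j k := by
        rw [Finset.sum_range_succ]
        simp
      simp only [Nat.choose_zero_right, Nat.cast_one, one_mul] at this ⊢
      rw [this, h2, ← ih k]
    cases k with
    | zero =>
      rw [peel, split]
      have h1 : ∑ j ∈ Finset.range (m + 1), (m.choose j : Int) * stir (j+1) 0 = 0 := by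
        simp [stir]
      have lhs0 : stir (m+2) (0+1) = stir (m+1) (0+1) := by simp [stir]
      linear_combination lhs0 - h1 - reass
    | succ k' =>
      rw [peel, split]
      have h1 : ∑ j ∈ Finset.range (m + 1), (m.choose j : Int) * stir (j+1) (k'+1)
          = (k'+1) * stir (m+1) (k'+2) + stir (m+1) (k'+1) := by
        have : ∀ j ∈ Finset.range (m+1), (m.choose j : Int) * stir (j+1) (k'+1)
            = (k'+1) * ((m.choose j : Int) * stir j (k'+1)) + (m.choose j : Int) * stir j k' := by
          intro j _; show (m.choose j : Int) * ((k'+1) * stir j (k'+1) + stir j k') = _; ring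
        rw [Finset.sum_congr rfl this, Finset.sum_add_distrib, ← Finset.mul_sum, ← ih (k'+1), ← ih k']
      have lhs0 : stir (m+2) (k'+1+1) = ((k'+1 : Nat) : Int) * stir (m+1) (k'+1+1) + stir (m+1) (k'+1+1) + stir (m+1) (k'+1) := by
        show ((k'+1 : Nat) + 1 : Int) * stir (m+1) (k'+2) + stir (m+1) (k'+1) = _
        push_cast; ring
      push_cast at lhs0
      linear_combination lhs0 - h1 - reass

theorem bell_rec (m : Nat) :
    bell (m + 1) = ∑ j ∈ Finset.range (m + 1), (m.choose j : Int) * bell j := by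
  unfold bell
  rw [Finset.sum_range_succ']
  have h0 : stir (m+1) 0 = 0 := rfl
  rw [h0, add_zero]
  have : ∀ k ∈ Finset.range (m+1), stir (m+1) (k+1)
      = ∑ j ∈ Finset.range (m + 1), (m.choose j : Int) * stir j k :=
    fun k _ => stir_binom m k
  rw [Finset.sum_congr rfl this, Finset.sum_comm]
  refine Finset.sum_congr rfl (fun j hj => ?_)
  rw [← Finset.mul_sum]
  have hj' : j < m + 1 := Finset.mem_range.mp hj
  have hsub : Finset.range (j+1) ⊆ Finset.range (m+1) := by
    intro x hx
    simp only [Finset.mem_range] at hx ⊢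
    omega
  have hzero : ∀ x ∈ Finset.range (m+1), x ∉ Finset.range (j+1) → stir j x = 0 := by
    intro x _ hnx
    simp only [Finset.mem_range, not_lt] at hnx
    exact stir_eq_zero j x hnx
  have hsum := Finset.sum_subset hsub hzero
  rw [← hsum]

theorem tri_formula (m : Nat) : ∀ k, k ≤ m →
    tri m k = ∑ j ∈ Finset.range (k + 1), (k.choose j : Int) * bell (m - k + j) := by
  induction m with
  | zero => intro k hk; interval_cases k; simp [tri, bell, stir]
  | succ m ihm =>
    intro k
    induction k with
    | zero =>
      intro _
      have e : tri (m+1) 0 = tri m m := by simp [tri]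
      rw [e, ihm m le_rfl]
      simp only [Nat.sub_self, Nat.zero_add]
      rw [← bell_rec m]
      simp
    | succ k ihk =>
      intro hk
      have hkm : k ≤ m := by omega
      have e : tri (m+1) (k+1) = tri (m+1) k + tri m k := by simp [tri]
      rw [e, ihk (by omega), ihm k hkm]
      rw [Finset.sum_range_succ' (fun j => ((k+1).choose j : Int) * bell (m + 1 - (k+1) + j)) (k+1)]
      have pascal : ∀ j, ((k+1).choose (j+1) : Int) = (k.choose j : Int) + (k.choose (j+1) : Int) := by
        intro j; rw [Nat.choose_succ_succ]; push_cast; ring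
      have split : ∑ j ∈ Finset.range (k + 1), ((k+1).choose (j+1) : Int) * bell (m + 1 - (k+1) + (j+1))
          = (∑ j ∈ Finset.range (k + 1), (k.choose j : Int) * bell (m - k + j + 1))
            + ∑ j ∈ Finset.range (k + 1), (k.choose (j+1) : Int) * bell (m - k + (j+1)) := by
        rw [← Finset.sum_add_distrib]
        refine Finset.sum_congr rfl (fun j _ => ?_)
        have e : m + 1 - (k+1) + (j+1) = m - k + j + 1 := by omega
        have e2 : m - k + (j + 1) = m - k + j + 1 := by omega
        rw [e, e2, pascal j]; ring
      rw [split]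
      have reass : (∑ j ∈ Finset.range (k + 1), (k.choose (j+1) : Int) * bell (m - k + (j+1)))
            + ((k+1).choose 0 : Int) * bell (m + 1 - (k+1) + 0) = ∑ j ∈ Finset.range (k + 1), (k.choose j : Int) * bell (m - k + j) := by
        have h := (Finset.sum_range_succ' (fun j => (k.choose j : Int) * bell (m - k + j)) (k+1)).symm
        simp only [Nat.choose_zero_right, Nat.cast_one, one_mul, Nat.add_zero] at h ⊢
        have e : m + 1 - (k + 1) = m - k := by omega
        rw [e]
        rw [h, Finset.sum_range_succ]
        simp
      have e3 : ∀ j, m + 1 - k + j = m - k + j + 1 := fun j => by omega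
      have lhs1 : ∑ j ∈ Finset.range (k + 1), (k.choose j : Int) * bell (m + 1 - k + j)
          = ∑ j ∈ Finset.range (k + 1), (k.choose j : Int) * bell (m - k + j + 1) := by
        refine Finset.sum_congr rfl (fun j _ => by rw [e3 j])
      rw [lhs1]
      rw [add_assoc, reass]

theorem tri_diag (m : Nat) : tri m m = bell (m + 1) := by
  rw [tri_formula m m le_rfl]
  simp only [Nat.sub_self, Nat.zero_add]
  exact (bell_rec m).symm

theorem getD_neg_one_map_range (f : Nat → Int) (m : Nat) (d : Int) :
    PySem.List.pyGetD ((List.range (m+1)).map f) (-1) d = f m := by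
  simp [PySem.List.pyGetD, PySem.List.pyGet?, PySem.List.pyIdx?]

-- rolling-sum inner loop
theorem inner_loop (f g : Nat → Int) (h : ∀ t, g (t+1) = g t + f t) :
    ∀ (s t : Nat),
      ((List.range' t s).map f).foldl (fun p x => (p.1 + x, p.2 ++ [p.1 + x]))
          (g t, (List.range (t+1)).map g)
        = (g (t+s), (List.range (t+s+1)).map g) := by
  intro s
  induction s with
  | zero => intro t; simp
  | succ s ih =>
    intro t
    rw [List.range'_succ, List.map_cons, List.foldl_cons]
    have e1 : g t + f t = g (t+1) := (h t).symm
    rw [e1]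
    have e2 : (List.range (t+1)).map g ++ [g (t+1)] = (List.range (t+2)).map g := by
      rw [List.range_succ (n := t+1), List.map_append]; rfl
    rw [e2]
    have := ih (t+1)
    simp only [show t + 1 + s = t + (s+1) by omega] at this
    exact this

theorem step_row (m : Nat) :
    (let c := PySem.List.pyGetD ((List.range (m+1)).map (tri m)) (-1) 0
     (((List.range (m+1)).map (tri m)).foldl
        (fun s x => (s.1 + x, s.2 ++ [s.1 + x])) (c, [c])).2)
      = (List.range (m+1+1)).map (tri (m+1)) := by
  show ((((List.range (m+1)).map (tri m)).foldl (fun s x => (s.1 + x, s.2 ++ [s.1 + x]))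
      (PySem.List.pyGetD ((List.range (m+1)).map (tri m)) (-1) 0,
       [PySem.List.pyGetD ((List.range (m+1)).map (tri m)) (-1) 0])).2)
      = (List.range (m+1+1)).map (tri (m+1))
  simp only [getD_neg_one_map_range]
  have hc : tri m m = tri (m+1) 0 := by simp [tri]
  have h := inner_loop (tri m) (tri (m+1)) (fun t => by simp [tri]) (m+1) 0
  rw [← List.range_eq_range'] at h
  simp only [Nat.zero_add, List.range_one, List.map_cons, List.map_nil] at h
  rw [hc, h]

theorem iter_rows (m : Nat) :
    (fun row : List Int =>
      let c := PySem.List.pyGetD row (-1) 0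
      (row.foldl (fun s x => (s.1 + x, s.2 ++ [s.1 + x])) (c, [c])).2)^[m] [1]
      = (List.range (m+1)).map (tri m) := by
  induction m with
  | zero => simp [tri]
  | succ m ih =>
    rw [Function.iterate_succ_apply', ih]
    exact step_row m

theorem foldl_ignore_iterate {α β : Type} (g : α → α) (l : List β) (init : α) :
    l.foldl (fun a _ => g a) init = g^[l.length] init := by
  induction l generalizing init with
  | nil => rfl
  | cons x t ih => rw [List.foldl_cons, ih, List.length_cons, Function.iterate_succ_apply]

theorem func_alt_eq_tri (n : Int) (h : 0 < n) :
    func_alt n = tri (n.toNat - 1) (n.toNat - 1) := by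
  unfold func_alt
  rw [if_neg (by omega)]
  show PySem.List.pyGetD ((PySem.List.pyRange 0 (n - 1) 1).foldl (fun row _ =>
      let c := PySem.List.pyGetD row (-1) 0
      (row.foldl (fun s x => (s.1 + x, s.2 ++ [s.1 + x])) (c, [c])).2) [1]) (-1) 0 = _
  rw [foldl_ignore_iterate (fun row : List Int =>
      let c := PySem.List.pyGetD row (-1) 0
      (row.foldl (fun s x => (s.1 + x, s.2 ++ [s.1 + x])) (c, [c])).2)]
  have hl : (PySem.List.pyRange 0 (n-1) 1).length = n.toNat - 1 := by
    rw [PySem.List.length_pyRange_one]; omega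
  rw [hl, iter_rows, getD_neg_one_map_range]

theorem func_alt_eq_bell (n : Int) (h : 0 < n) : func_alt n = bell n.toNat := by
  rw [func_alt_eq_tri n h, tri_diag]
  rw [show n.toNat - 1 + 1 = n.toNat from by omega]

theorem func_zero (n : Int) (h : n ≤ 0) : func n = 0 := by
  unfold func
  rw [PySem.List.pyRange_one_eq_nil h, PySem.List.pyRange_one_eq_nil (by omega : n - 1 ≤ 0)]
  rfl

-- ===== VERDICT (by name: the statement is the Claim_ definition above) =====
theorem func_spec : Claim_equal_func := by
  intro n _
  unfold Spec_func
  by_cases h : 0 < n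
  · rw [func_eq_bell n h, func_alt_eq_bell n h]
  · rw [func_zero n (by omega), func_alt, if_pos (by omega)]
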